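-- pv_equiv track=rewrite | github.com/sinaziaee/DComG | utils.py | predict_top_new_edges
-- ===== SOURCE A (Python) =====
-- def predict_top_new_edges(all_top_pairs):
--   all_new_pairs = []
--   for pairs in all_top_pairs:
--     temp_new_pairs = []
--     temp = pairs
--     temp_edges = temp[0]
--     count = 0
--     for edge in temp_edges:
--       t = 0
--       for i in range(len(temp)):
--         e_list = temp[i]
--         if edge in e_list:
--           t += 1
--       if t == len(temp):
--         count += 1
--         temp_new_pairs.append(edge)
--     all_new_pairs.append(temp_new_pairs)
--   return all_new_pairs
-- ===== SOURCE B (Python) =====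
-- def predict_top_new_edges(all_top_pairs):
--     result = []
--     for pairs in all_top_pairs:
--         first = pairs[0]
--         common = set(first)
--         for l in pairs[1:]:
--             common &= set(l)
--         result.append([e for e in first if e in common])
--     return result
-- ===== Notes on version B (the rewrite author's own statement) =====
-- stated objective: faster
-- what changed: Per group, build the intersection of all lists as a set once (reducing set(pairs[0]) with &=) and filter the first list through it in one pass, instead of rescanning every list of the group for every edge of the first list.
import Mathlib
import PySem

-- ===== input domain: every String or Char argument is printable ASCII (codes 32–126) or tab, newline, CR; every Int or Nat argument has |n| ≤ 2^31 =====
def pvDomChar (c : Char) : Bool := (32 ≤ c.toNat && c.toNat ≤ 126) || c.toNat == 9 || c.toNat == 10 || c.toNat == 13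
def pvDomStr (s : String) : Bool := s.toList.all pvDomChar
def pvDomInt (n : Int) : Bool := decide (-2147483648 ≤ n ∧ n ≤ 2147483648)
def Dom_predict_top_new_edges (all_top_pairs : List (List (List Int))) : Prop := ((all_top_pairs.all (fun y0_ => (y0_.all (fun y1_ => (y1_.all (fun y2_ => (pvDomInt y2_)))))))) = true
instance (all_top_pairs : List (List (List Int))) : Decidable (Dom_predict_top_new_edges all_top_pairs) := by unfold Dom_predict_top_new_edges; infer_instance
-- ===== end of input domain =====

-- B replaces A's per-edge rescan of every list with one intersection set per group, then a single filtering pass (faster).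
-- Pre_ excludes inputs containing an empty group, on which Python A raises IndexError at pairs[0] (B raises there too).


-- ===== PORT A =====
def predict_top_new_edges (all_top_pairs : List (List (List Int))) : List (List Int) :=
  all_top_pairs.foldl (fun all_new_pairs pairs =>
    let temp := pairs
    match PySem.List.pyGet? temp 0 with
    | none => all_new_pairs ++ [[]]   -- unreachable under Pre_: Python raises IndexError here
    | some temp_edges =>
      let st := temp_edges.foldl (fun (st : Int × List Int) edge =>
        let t := (PySem.List.pyRange 0 (temp.length : Int) 1).foldl (fun t i =>
          let e_list := PySem.List.pyGetD temp i []
          if edge ∈ e_list then t + 1 else t) (0 : Int)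
        if t = (temp.length : Int) then (st.1 + 1, st.2 ++ [edge]) else st)
        ((0 : Int), ([] : List Int))
      all_new_pairs ++ [st.2]) []

-- ===== PORT B =====
def predict_top_new_edges_alt (all_top_pairs : List (List (List Int))) : List (List Int) :=
  all_top_pairs.map (fun pairs =>
    match PySem.List.pyGet? pairs 0 with
    | none => []   -- unreachable under Pre_: Python B raises IndexError here
    | some first =>
      let common := (pairs.drop 1).foldl
        (fun s l => PySem.Set.inter s (PySem.Set.ofList l)) (PySem.Set.ofList first)
      first.filter (fun e => PySem.Set.contains common e))

-- ===== PRECONDITION & SPEC =====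
-- Pre_ excludes exactly the inputs with an empty group: there Python A raises IndexError on pairs[0].
def Pre_predict_top_new_edges (all_top_pairs : List (List (List Int))) : Prop :=
  ∀ pairs ∈ all_top_pairs, pairs ≠ []
instance (all_top_pairs : List (List (List Int))) : Decidable (Pre_predict_top_new_edges all_top_pairs) := by unfold Pre_predict_top_new_edges; infer_instance
def pvWitness_predict_top_new_edges : List (List (List Int)) := [[[1, 2], [2, 3]], [[5]]]
def Spec_predict_top_new_edges (all_top_pairs : List (List (List Int))) (out : List (List Int)) : Prop := out = predict_top_new_edges_alt all_top_pairs
instance (all_top_pairs : List (List (List Int))) (out : List (List Int)) : Decidable (Spec_predict_top_new_edges all_top_pairs out) := by unfold Spec_predict_top_new_edges; infer_instance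

-- ===== CLAIM (what is proved, stated in full; the proofs are below) =====
def Claim_equal_predict_top_new_edges : Prop := ∀ (all_top_pairs : List (List (List Int))), Dom_predict_top_new_edges all_top_pairs → Pre_predict_top_new_edges all_top_pairs → Spec_predict_top_new_edges all_top_pairs (predict_top_new_edges all_top_pairs)

-- ===== LEMMAS AND PROOFS =====

-- A's inner (count, list) accumulator: its second component is a filter of the traversed list.
theorem pv_foldl_pair_filter (p : Int → Prop) [DecidablePred p] :
    ∀ (l : List Int) (c : Int) (acc : List Int),
      (l.foldl (fun (st : Int × List Int) x =>
        if p x then (st.1 + 1, st.2 ++ [x]) else st) (c, acc)).2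
      = acc ++ l.filter (fun x => decide (p x)) := by
  intro l
  induction l with
  | nil => intro c acc; simp
  | cons x xs ih =>
    intro c acc
    by_cases h : p x <;> simp [List.foldl_cons, h, ih]

-- A's t-counter equals the Int cast of countP.
theorem pv_count_foldl (edge : Int) :
    ∀ (temp : List (List Int)) (t0 : Int),
      temp.foldl (fun t e_list => if edge ∈ e_list then t + 1 else t) t0
        = t0 + (temp.countP (fun l => decide (edge ∈ l)) : Int) := by
  intro temp
  induction temp with
  | nil => intro t0; simp
  | cons l ls ih =>
    intro t0
    by_cases h : edge ∈ l <;> simp [List.foldl_cons, h, ih, List.countP_cons] <;> ring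

-- Membership in the reduced intersection set.
theorem pv_mem_foldl_inter (y : Int) :
    ∀ (rest : List (List Int)) (s : PySem.Set Int),
      (y ∈ rest.foldl (fun s l => PySem.Set.inter s (PySem.Set.ofList l)) s)
        ↔ y ∈ s ∧ ∀ l ∈ rest, y ∈ l := by
  intro rest
  induction rest with
  | nil => intro s; simp
  | cons l ls ih =>
    intro s
    simp [List.foldl_cons, ih, PySem.Set.mem_inter, PySem.Set.mem_ofList]
    tauto

-- the per-group value A computes
def pvGroupA (pairs : List (List Int)) : List Int :=
  match PySem.List.pyGet? pairs 0 with
  | none => []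
  | some temp_edges =>
    (temp_edges.foldl (fun (st : Int × List Int) edge =>
      let t := (PySem.List.pyRange 0 (pairs.length : Int) 1).foldl (fun t i =>
        let e_list := PySem.List.pyGetD pairs i []
        if edge ∈ e_list then t + 1 else t) (0 : Int)
      if t = (pairs.length : Int) then (st.1 + 1, st.2 ++ [edge]) else st)
      ((0 : Int), ([] : List Int))).2

theorem pv_A_eq_map : ∀ (xs : List (List (List Int))) (acc : List (List Int)),
    xs.foldl (fun all_new_pairs pairs =>
      let temp := pairs
      match PySem.List.pyGet? temp 0 with
      | none => all_new_pairs ++ [[]]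
      | some temp_edges =>
        let st := temp_edges.foldl (fun (st : Int × List Int) edge =>
          let t := (PySem.List.pyRange 0 (temp.length : Int) 1).foldl (fun t i =>
            let e_list := PySem.List.pyGetD temp i []
            if edge ∈ e_list then t + 1 else t) (0 : Int)
          if t = (temp.length : Int) then (st.1 + 1, st.2 ++ [edge]) else st)
          ((0 : Int), ([] : List Int))
        all_new_pairs ++ [st.2]) acc
    = acc ++ xs.map pvGroupA := by
  intro xs
  induction xs with
  | nil => intro acc; simp
  | cons pairs rest ih =>
    intro acc
    rw [List.foldl_cons, List.map_cons, ih]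
    cases h : PySem.List.pyGet? pairs 0 <;> simp [pvGroupA, h]

theorem predict_group_eq (pairs : List (List Int)) (hne : pairs ≠ []) :
    pvGroupA pairs
    = (match PySem.List.pyGet? pairs 0 with
    | none => []
    | some first =>
      first.filter (fun e => PySem.Set.contains
        ((pairs.drop 1).foldl (fun s l => PySem.Set.inter s (PySem.Set.ofList l))
          (PySem.Set.ofList first)) e)) := by
  obtain ⟨first, rest, rfl⟩ : ∃ a b, pairs = a :: b := by
    cases pairs with
    | nil => exact absurd rfl hne
    | cons a b => exact ⟨a, b, rfl⟩
  have hget : PySem.List.pyGet? (first :: rest) 0 = some first := by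
    simp [PySem.List.pyGet?, PySem.List.pyIdx?]
  unfold pvGroupA
  rw [hget]
  simp only []
  have hrange : ∀ edge : Int,
      (PySem.List.pyRange 0 ((first :: rest).length : Int) 1).foldl (fun t i =>
        if edge ∈ PySem.List.pyGetD (first :: rest) i [] then t + 1 else t) (0 : Int)
      = (first :: rest).foldl (fun t e_list => if edge ∈ e_list then t + 1 else t) 0 := by
    intro edge
    exact PySem.List.foldl_pyRange_zero_pyGetD' (first :: rest) []
      (fun t e_list => if edge ∈ e_list then t + 1 else t) 0
  simp only [hrange]
  rw [pv_foldl_pair_filter (fun edge =>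
      (first :: rest).foldl (fun t e_list => if edge ∈ e_list then t + 1 else t) 0
        = ((first :: rest).length : Int))]
  simp only [List.nil_append, List.drop_succ_cons, List.drop_zero]
  apply List.filter_congr
  intro e he
  have hmem : (PySem.Set.contains
      (rest.foldl (fun s l => PySem.Set.inter s (PySem.Set.ofList l))
        (PySem.Set.ofList first)) e)
      = decide (∀ l ∈ first :: rest, e ∈ l) := by
    by_cases hall : ∀ l ∈ first :: rest, e ∈ l
    · have hm : e ∈ rest.foldl (fun s l => PySem.Set.inter s (PySem.Set.ofList l))
          (PySem.Set.ofList first) := by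
        rw [pv_mem_foldl_inter]
        exact ⟨(PySem.Set.mem_ofList _ _).mpr (hall first (by simp)),
          fun l hl => hall l (by simp [hl])⟩
      rw [(PySem.Set.contains_iff _ e).mpr hm]
      symm; rw [decide_eq_true_iff]; exact hall
    · have hm : e ∉ rest.foldl (fun s l => PySem.Set.inter s (PySem.Set.ofList l))
          (PySem.Set.ofList first) := by
        rw [pv_mem_foldl_inter]
        rintro ⟨h1, h2⟩
        exact hall (fun l hl => by
          rcases List.mem_cons.mp hl with rfl | hl
          · exact he
          · exact h2 l hl)
      have hcf : (PySem.Set.contains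
          (rest.foldl (fun s l => PySem.Set.inter s (PySem.Set.ofList l))
            (PySem.Set.ofList first)) e) = false := by
        rw [← Bool.not_eq_true, PySem.Set.contains_iff]; exact hm
      rw [hcf]
      symm; rw [decide_eq_false_iff_not]; exact hall
  rw [hmem]
  have hcount : ((first :: rest).foldl (fun t e_list => if e ∈ e_list then t + 1 else t) 0
      = ((first :: rest).length : Int)) ↔ ∀ l ∈ first :: rest, e ∈ l := by
    rw [pv_count_foldl e (first :: rest) 0, zero_add]
    constructor
    · intro h
      have hc : (first :: rest).countP (fun l => decide (e ∈ l)) = (first :: rest).length := by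
        exact_mod_cast h
      have hc2 := List.countP_eq_length.mp hc
      intro l hl; simpa using hc2 l hl
    · intro h
      have hc : (first :: rest).countP (fun l => decide (e ∈ l)) = (first :: rest).length :=
        List.countP_eq_length.mpr (fun l hl => by simpa using h l hl)
      exact_mod_cast hc
  exact decide_eq_decide.mpr hcount

-- ===== VERDICT (by name: the statement is the Claim_ definition above) =====
theorem predict_top_new_edges_spec : Claim_equal_predict_top_new_edges := by
  intro xs _ hpre
  unfold Spec_predict_top_new_edges predict_top_new_edges predict_top_new_edges_alt
  rw [pv_A_eq_map xs []]
  simp only [List.nil_append]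
  apply List.map_congr_left
  intro pairs hp
  rw [predict_group_eq pairs (hpre pairs hp)]
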